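-- pv_equiv track=rewrite | github.com/LauraChen/dsp | python/q6_strings.py | mix_up
-- ===== SOURCE A (Python) =====
-- def mix_up(a, b):
--     a2=[x for x in a]
--     b2=[y for y in b]
--     del(a2[0],a2[0])
--     del(b2[0],b2[0])
--     for i in range(2):
--         a2.insert(i,b[i])
--         b2.insert(i,a[i])
--     return(''.join(a2)+" "+''.join(b2))
-- ===== SOURCE B (Python) =====
-- def mix_up(a, b):
--     return b[0] + b[1] + a[2:] + " " + a[0] + a[1] + b[2:]
-- ===== Notes on version B (the rewrite author's own statement) =====
-- stated objective: idiomatic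
-- what changed: Replaces A's char-list building, paired del-and-insert loop and join with a single concatenated slicing/indexing expression.
import Mathlib
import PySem

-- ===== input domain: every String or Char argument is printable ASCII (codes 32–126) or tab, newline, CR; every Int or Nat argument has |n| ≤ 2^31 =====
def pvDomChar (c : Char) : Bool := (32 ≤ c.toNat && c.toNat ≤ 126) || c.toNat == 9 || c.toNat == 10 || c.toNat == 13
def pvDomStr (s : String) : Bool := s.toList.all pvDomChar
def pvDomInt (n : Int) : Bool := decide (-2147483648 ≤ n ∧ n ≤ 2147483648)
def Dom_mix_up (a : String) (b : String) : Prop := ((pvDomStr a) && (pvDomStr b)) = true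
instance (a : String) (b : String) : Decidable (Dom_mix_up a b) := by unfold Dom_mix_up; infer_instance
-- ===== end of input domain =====

-- B replaces A's char-list building, del-and-insert loop and join with one concatenated
-- indexing/slicing expression (objective: idiomatic).

-- ===== PORT A =====
-- list(a), list(b); del first two of each; insert b[i]/a[i] at i for i in range(2); join.
-- Outside Pre_ (a string shorter than 2) Python raises IndexError; the port returns "" there.
def mix_up (a : String) (b : String) : String :=
  let a2 := a.toList
  let b2 := b.toList
  match PySem.List.pop? a2 (0 : Int) with
  | none => ""
  | some (_, a2) =>
    match PySem.List.pop? a2 (0 : Int) with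
    | none => ""
    | some (_, a2) =>
      match PySem.List.pop? b2 (0 : Int) with
      | none => ""
      | some (_, b2) =>
        match PySem.List.pop? b2 (0 : Int) with
        | none => ""
        | some (_, b2) =>
          let st := (PySem.List.pyRange 0 2 1).foldl
            (fun (p : List Char × List Char) i =>
              (PySem.List.insert p.1 i (PySem.List.pyGetD b.toList i ' '),
               PySem.List.insert p.2 i (PySem.List.pyGetD a.toList i ' ')))
            (a2, b2)
          String.ofList st.1 ++ " " ++ String.ofList st.2

-- ===== PORT B =====
-- b[0] + b[1] + a[2:] + " " + a[0] + a[1] + b[2:]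
def mix_up_alt (a : String) (b : String) : String :=
  match PySem.Str.pyGet? b (0 : Int), PySem.Str.pyGet? b (1 : Int),
        PySem.Str.pyGet? a (0 : Int), PySem.Str.pyGet? a (1 : Int) with
  | some c0, some c1, some d0, some d1 =>
      String.ofList [c0, c1] ++ PySem.Str.slice a (some 2) none ++ " "
        ++ String.ofList [d0, d1] ++ PySem.Str.slice b (some 2) none
  | _, _, _, _ => ""

-- ===== PRECONDITION & SPEC =====
-- A raises IndexError whenever either string has fewer than 2 characters.
def Pre_mix_up (a : String) (b : String) : Prop :=
  2 ≤ a.toList.length ∧ 2 ≤ b.toList.length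
instance (a : String) (b : String) : Decidable (Pre_mix_up a b) := by
  unfold Pre_mix_up; infer_instance
def pvWitness_mix_up : String × String := ("mix", "pod")

def Spec_mix_up (a : String) (b : String) (out : String) : Prop := out = mix_up_alt a b
instance (a : String) (b : String) (out : String) : Decidable (Spec_mix_up a b out) := by unfold Spec_mix_up; infer_instance

-- ===== CLAIM (what is proved, stated in full; the proofs are below) =====
def Claim_equal_mix_up : Prop := ∀ (a : String) (b : String), Dom_mix_up a b → Pre_mix_up a b → Spec_mix_up a b (mix_up a b)

-- ===== LEMMAS AND PROOFS =====

theorem mix_up_eq (a0 a1 : Char) (ar : List Char) (b0 b1 : Char) (br : List Char)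
    (a b : String) (ha : a.toList = a0 :: a1 :: ar) (hb : b.toList = b0 :: b1 :: br) :
    mix_up a b = String.ofList (b0 :: b1 :: ar) ++ " " ++ String.ofList (a0 :: a1 :: br) := by
  simp [mix_up, ha, hb, PySem.List.pyRange, List.range_succ, PySem.List.insert,
    PySem.List.sliceIndices, PySem.List.pyGetD]

theorem mix_up_alt_eq (a0 a1 : Char) (ar : List Char) (b0 b1 : Char) (br : List Char)
    (a b : String) (ha : a.toList = a0 :: a1 :: ar) (hb : b.toList = b0 :: b1 :: br) :
    mix_up_alt a b = String.ofList (b0 :: b1 :: ar) ++ " " ++ String.ofList (a0 :: a1 :: br) := by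
  have h1 : PySem.Str.pyGet? a (0 : Int) = some a0 := by
    rw [show (0 : Int) = ((0 : Nat) : Int) from rfl, PySem.Str.pyGet?_natCast, ha]; rfl
  have h2 : PySem.Str.pyGet? a (1 : Int) = some a1 := by
    rw [show (1 : Int) = ((1 : Nat) : Int) from rfl, PySem.Str.pyGet?_natCast, ha]; rfl
  have h3 : PySem.Str.pyGet? b (0 : Int) = some b0 := by
    rw [show (0 : Int) = ((0 : Nat) : Int) from rfl, PySem.Str.pyGet?_natCast, hb]; rfl
  have h4 : PySem.Str.pyGet? b (1 : Int) = some b1 := by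
    rw [show (1 : Int) = ((1 : Nat) : Int) from rfl, PySem.Str.pyGet?_natCast, hb]; rfl
  simp only [mix_up_alt, h1, h2, h3, h4]
  have hsa : PySem.Str.slice a (some 2) none = String.ofList ar := by
    simp only [PySem.Str.slice, ha]
    simp [PySem.Chars.slice, PySem.List.slice]
  have hsb : PySem.Str.slice b (some 2) none = String.ofList br := by
    simp only [PySem.Str.slice, hb]
    simp [PySem.Chars.slice, PySem.List.slice]
  rw [hsa, hsb, show (" " : String) = String.ofList [' '] from rfl]
  simp [← String.ofList_append, String.append_assoc]

-- ===== VERDICT (by name: the statement is the Claim_ definition above) =====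
theorem mix_up_spec : Claim_equal_mix_up := by
  intro a b _ hpre
  obtain ⟨ha2, hb2⟩ := hpre
  obtain ⟨a0, a1, ar, ha⟩ : ∃ a0 a1 ar, a.toList = a0 :: a1 :: ar := by
    match h : a.toList with
    | [] => simp [h] at ha2
    | [x] => simp [h] at ha2
    | x :: y :: r => exact ⟨x, y, r, rfl⟩
  obtain ⟨b0, b1, br, hb⟩ : ∃ b0 b1 br, b.toList = b0 :: b1 :: br := by
    match h : b.toList with
    | [] => simp [h] at hb2
    | [x] => simp [h] at hb2
    | x :: y :: r => exact ⟨x, y, r, rfl⟩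
  unfold Spec_mix_up
  rw [mix_up_eq a0 a1 ar b0 b1 br a b ha hb, mix_up_alt_eq a0 a1 ar b0 b1 br a b ha hb]
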